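-- pv_equiv track=rewrite | github.com/hariharanragothaman/AlgoDSBits | String/0522_longest_uncommon_subsequence_2.py | longest_uncommon_subsequence
-- ===== SOURCE A (Python) =====
-- def longest_uncommon_subsequence(input_list):
--     def is_subsequence(s, t):
--         t = iter(t)
--         return all(c in t for c in s)
--
--     input_list = sorted(input_list, key=len, reverse=True)
--     # one of the important test cases here, to if members of your lists are not subsequences
--     for string in input_list:
--         if sum(is_subsequence(string, t) for t in input_list) == 1:
--             return len(string)
--     return -1
-- ===== SOURCE B (Python) =====
-- def longest_uncommon_subsequence(input_list):
--     def is_subsequence(s, t):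
--         t = iter(t)
--         return all(c in t for c in s)
--
--     best = -1
--     for i, s in enumerate(input_list):
--         if not any(j != i and is_subsequence(s, t) for j, t in enumerate(input_list)):
--             best = max(best, len(s))
--     return best
-- ===== Notes on version B (the rewrite author's own statement) =====
-- stated objective: alternative
-- what changed: B removes A's length-descending sort and first-hit return: it scans the list once by index, marking a string uncommon when it is a subsequence of no other element (j != i), and keeps the maximum length of the uncommon strings.
import Mathlib
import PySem

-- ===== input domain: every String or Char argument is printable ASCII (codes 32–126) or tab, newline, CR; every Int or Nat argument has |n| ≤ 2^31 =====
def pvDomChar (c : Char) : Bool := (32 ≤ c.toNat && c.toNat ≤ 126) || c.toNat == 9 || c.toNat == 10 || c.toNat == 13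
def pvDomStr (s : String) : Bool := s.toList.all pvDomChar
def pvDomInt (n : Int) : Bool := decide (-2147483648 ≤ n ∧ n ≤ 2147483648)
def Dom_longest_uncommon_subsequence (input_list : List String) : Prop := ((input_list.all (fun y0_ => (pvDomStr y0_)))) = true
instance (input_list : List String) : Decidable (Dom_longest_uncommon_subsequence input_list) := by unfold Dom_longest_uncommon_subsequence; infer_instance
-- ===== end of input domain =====

-- B drops A's sort: one index-based scan keeping the max length of any string that is
-- a subsequence of no OTHER element (objective: alternative decomposition, no sort).

-- ===== PORT A =====
-- is_subsequence(s, t) with t = iter(t): greedy left-to-right matching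
def pvIsSub : List Char → List Char → Bool
  | [], _ => true
  | _ :: _, [] => false
  | c :: s, d :: t => if c == d then pvIsSub s t else pvIsSub (c :: s) t

-- the 'for string in input_list: if sum(...) == 1: return len(string)' loop over the sorted list
def pvLoopA (sortedList : List String) : List String → Int
  | [] => -1
  | s :: rest =>
      if sortedList.countP (fun t => pvIsSub s.toList t.toList) == 1 then
        PySem.Str.len s
      else pvLoopA sortedList rest

def longest_uncommon_subsequence (input_list : List String) : Int :=
  let l := PySem.List.sorted input_list (fun s => PySem.Str.len s) true
  pvLoopA l l

-- ===== PORT B =====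
def longest_uncommon_subsequence_alt (input_list : List String) : Int :=
  (PySem.List.enumerate input_list).foldl
    (fun best p =>
      if (PySem.List.enumerate input_list).any
           (fun q => q.1 != p.1 && pvIsSub p.2.toList q.2.toList) then best
      else max best (PySem.Str.len p.2))
    (-1)

-- ===== PRECONDITION & SPEC =====
def Spec_longest_uncommon_subsequence (input_list : List String) (out : Int) : Prop := out = longest_uncommon_subsequence_alt input_list
instance (input_list : List String) (out : Int) : Decidable (Spec_longest_uncommon_subsequence input_list out) := by unfold Spec_longest_uncommon_subsequence; infer_instance

-- ===== CLAIM (what is proved, stated in full; the proofs are below) =====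
def Claim_equal_longest_uncommon_subsequence : Prop := ∀ (input_list : List String), Dom_longest_uncommon_subsequence input_list → Spec_longest_uncommon_subsequence input_list (longest_uncommon_subsequence input_list)

-- ===== LEMMAS AND PROOFS =====

-- x is "uncommon" w.r.t. l₀: the only member of l₀ (with multiplicity) it embeds in is itself
def pvP (l₀ : List String) (x : String) : Bool :=
  l₀.countP (fun t => pvIsSub x.toList t.toList) == 1

-- the reference fold: max length over uncommon elements of m, starting from acc
def pvG (l₀ : List String) (m : List String) (acc : Int) : Int :=
  m.foldl (fun best x => if pvP l₀ x then max best (PySem.Str.len x) else best) acc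

theorem pvIsSub_refl : ∀ s : List Char, pvIsSub s s = true := by
  intro s; induction s with
  | nil => rfl
  | cons c t ih => simp [pvIsSub, ih]

theorem pvLen_nonneg (s : String) : 0 ≤ PySem.Str.len s := by
  simp [PySem.Str.len_eq]

-- a fold whose every candidate length is ≤ the accumulator leaves it unchanged
theorem pvG_const (l₀ : List String) (m : List String) (c : Int)
    (h : ∀ y ∈ m, PySem.Str.len y ≤ c) : pvG l₀ m c = c := by
  induction m with
  | nil => rfl
  | cons y rest ih =>
      have hy : max c (PySem.Str.len y) = c := max_eq_left (h y (by simp))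
      have hr : ∀ z ∈ rest, PySem.Str.len z ≤ c := fun z hz => h z (by simp [hz])
      simp only [pvG, List.foldl_cons]
      by_cases hp : pvP l₀ y = true
      · rw [if_pos hp, hy]; exact ih hr
      · rw [if_neg hp]; exact ih hr

-- on a length-nonincreasing list, the length of the first hit = the fold maximum
theorem pvLoopA_eq_pvG (l₀ : List String) :
    ∀ m : List String, m.Pairwise (fun a b => PySem.Str.len b ≤ PySem.Str.len a) →
    pvLoopA l₀ m = pvG l₀ m (-1) := by
  intro m hm
  induction m with
  | nil => rfl
  | cons x rest ih =>
      rw [List.pairwise_cons] at hm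
      obtain ⟨hx, hrest⟩ := hm
      simp only [pvLoopA, pvG, List.foldl_cons]
      by_cases hp : pvP l₀ x = true
      · have hp' : (l₀.countP (fun t => pvIsSub x.toList t.toList) == 1) = true := hp
        rw [if_pos hp', if_pos hp]
        rw [max_eq_right (le_trans (by norm_num) (pvLen_nonneg x))]
        exact (pvG_const l₀ rest (PySem.Str.len x) hx).symm
      · have hp' : ¬ (l₀.countP (fun t => pvIsSub x.toList t.toList) == 1) = true := hp
        rw [if_neg hp', if_neg hp]
        exact ih hrest

-- the fold is permutation-invariant
theorem pvG_perm (l₀ : List String) {m₁ m₂ : List String} (h : m₁.Perm m₂) :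
    ∀ acc, pvG l₀ m₁ acc = pvG l₀ m₂ acc := by
  induction h with
  | nil => intro acc; rfl
  | cons x _ ih => intro acc; simp only [pvG, List.foldl_cons] at *; exact ih _
  | swap x y m =>
      intro acc; simp only [pvG, List.foldl_cons]
      congr 1; split_ifs <;> simp [max_comm, max_assoc, max_left_comm]
  | trans _ _ ih₁ ih₂ => intro acc; exact (ih₁ acc).trans (ih₂ acc)

-- countP splits along a second test
theorem pvCountP_split {α : Type} (l : List α) (r s : α → Bool) :
    l.countP r = l.countP (fun a => r a && s a) + l.countP (fun a => r a && !s a) := by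
  induction l with
  | nil => rfl
  | cons a t ih =>
      simp only [List.countP_cons]
      cases hr : r a <;> cases hs : s a <;> simp [hr, hs] <;> omega

-- a nodup list with a unique satisfying member has countP = 1
theorem pvCountP_eq_one {α : Type} [DecidableEq α] (l : List α) (pred : α → Bool) (a : α)
    (ha : a ∈ l) (hpa : pred a = true) (hnd : l.Nodup)
    (huniq : ∀ b ∈ l, pred b = true → b = a) : l.countP pred = 1 := by
  induction l with
  | nil => cases ha
  | cons c t ih =>
      rw [List.nodup_cons] at hnd
      rcases List.mem_cons.mp ha with rfl | hat
      · have h0 : t.countP pred = 0 := by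
          rw [List.countP_eq_zero]
          intro b hb hpb
          exact absurd (huniq b (by simp [hb]) hpb ▸ hb) hnd.1
        simp [List.countP_cons, hpa, h0]
      · have hc : pred c = false := by
          cases hpc : pred c
          · rfl
          · exact absurd (huniq c (by simp) hpc ▸ hat) hnd.1
        simp only [List.countP_cons, hc, if_false, Nat.add_zero, cond_false]
        exact ih hat hnd.2 (fun b hb hpb => huniq b (by simp [hb]) hpb)

-- B's index-based scan computes the reference fold
theorem pvB_eq_pvG (l : List String) :
    longest_uncommon_subsequence_alt l = pvG l l (-1) := by
  unfold longest_uncommon_subsequence_alt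
  have hnd : (PySem.List.enumerate l (0:Int)).Nodup :=
    (PySem.List.pairwise_lt_enumerate (xs := l) (s := 0)).imp
      (fun {p q} h => by intro he; rw [he] at h; exact lt_irrefl _ h)
  have hstep : ∀ (acc : Int) (p : Int × String), p ∈ PySem.List.enumerate l (0:Int) →
      (if (PySem.List.enumerate l (0:Int)).any
            (fun q => q.1 != p.1 && pvIsSub p.2.toList q.2.toList) then acc
       else max acc (PySem.Str.len p.2))
      = (if pvP l p.2 = true then max acc (PySem.Str.len p.2) else acc) := by
    intro acc p hp
    have hpmem := hp
    rw [PySem.List.mem_enumerate_iff] at hp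
    obtain ⟨k, hk, rfl⟩ := hp
    generalize hxe : l[k]'hk = x at *
    -- total count over l = count over the enumeration
    have hmap : (PySem.List.enumerate l (0:Int)).map (·.2) = l :=
      PySem.List.map_snd_enumerate ..
    have htot : (PySem.List.enumerate l (0:Int)).countP (fun q => pvIsSub x.toList q.2.toList)
        = l.countP (fun t => pvIsSub x.toList t.toList) := by
      conv_rhs => rw [← hmap]
      rw [List.countP_map]; rfl
    -- exactly one pair carries the self index, and it matches itself
    have hself : ((0:Int) + (k:Int), x) ∈ PySem.List.enumerate l (0:Int) := hpmem
    have hone : (PySem.List.enumerate l (0:Int)).countP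
        (fun q => (q.1 == (0:Int) + (k:Int)) && pvIsSub x.toList q.2.toList) = 1 := by
      apply pvCountP_eq_one _ _ (((0:Int) + (k:Int), x)) hself
      · simp [pvIsSub_refl]
      · exact hnd
      · intro b hb hpb
        rw [PySem.List.mem_enumerate_iff] at hb
        obtain ⟨j, hj, rfl⟩ := hb
        simp only [Bool.and_eq_true, beq_iff_eq] at hpb
        have : j = k := by omega
        subst this
        simp [hxe]
    have hsplit := pvCountP_split (PySem.List.enumerate l (0:Int))
      (fun q => pvIsSub x.toList q.2.toList) (fun q => q.1 == (0:Int) + (k:Int))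
    have hcomm : ∀ q : Int × String,
        (pvIsSub x.toList q.2.toList && (q.1 == (0:Int) + (k:Int)))
          = ((q.1 == (0:Int) + (k:Int)) && pvIsSub x.toList q.2.toList) := by
      intro q; exact Bool.and_comm ..
    by_cases hany : (PySem.List.enumerate l (0:Int)).any
        (fun q => q.1 != ((0:Int) + (k:Int), x).1 && pvIsSub x.toList q.2.toList) = true
    · -- another index also matches: the count is at least 2, so pvP is false
      rw [List.any_eq_true] at hany
      obtain ⟨q, hqmem, hq⟩ := hany
      have h1 : 1 ≤ (PySem.List.enumerate l (0:Int)).countP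
          (fun q => pvIsSub x.toList q.2.toList && !(q.1 == (0:Int) + (k:Int))) := by
        rw [Nat.one_le_iff_ne_zero, Ne, List.countP_eq_zero]
        push_neg
        refine ⟨q, hqmem, ?_⟩
        simp only [Bool.and_eq_true, bne_iff_ne, ne_eq] at hq
        have h' : ¬ q.1 = 0 + (k:Int) := hq.1
        simp only [Bool.and_eq_true, Bool.not_eq_true', beq_eq_false_iff_ne, ne_eq]
        exact ⟨hq.2, by omega⟩
      have hfalse : pvP l x = false := by
        simp only [pvP, beq_eq_false_iff_ne, Ne]
        intro hcp
        rw [← htot] at hcp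
        rw [hsplit] at hcp
        simp only [hcomm] at hcp
        rw [hone] at hcp
        omega
      rw [if_pos (by exact List.any_eq_true.mpr ⟨q, hqmem, hq⟩), hfalse]
      simp
    · -- no other index matches: the count is exactly 1 (the string itself), pvP holds
      have h0 : (PySem.List.enumerate l (0:Int)).countP
          (fun q => pvIsSub x.toList q.2.toList && !(q.1 == (0:Int) + (k:Int))) = 0 := by
        rw [List.countP_eq_zero]
        intro q hqmem hq
        rw [Bool.and_eq_true] at hq
        apply hany
        rw [List.any_eq_true]
        refine ⟨q, hqmem, ?_⟩
        have h' : ¬ q.1 = 0 + (k:Int) := by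
          simpa using hq.2
        simp only [Bool.and_eq_true, bne_iff_ne, ne_eq]
        exact ⟨by omega, hq.1⟩
      have htrue : pvP l x = true := by
        simp only [pvP, beq_iff_eq]
        rw [← htot, hsplit]
        simp only [hcomm]
        rw [hone, h0]
      rw [if_neg hany, htrue]
      simp
  rw [PySem.List.foldl_congr_mem _ _ _ _ hstep]
  have hmap : (PySem.List.enumerate l (0:Int)).map (·.2) = l :=
    PySem.List.map_snd_enumerate ..
  simp only [pvG]
  have hfm : (((PySem.List.enumerate l (0:Int)).map (·.2)).foldl
      (fun best x => if pvP l x = true then max best (PySem.Str.len x) else best) (-1 : Int))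
      = (PySem.List.enumerate l (0:Int)).foldl
      (fun acc q => if pvP l q.2 = true then max acc (PySem.Str.len q.2) else acc) (-1 : Int) :=
    List.foldl_map (f := fun q : Int × String => q.2)
      (g := fun best x => if pvP l x = true then max best (PySem.Str.len x) else best)
  rw [hmap] at hfm
  exact hfm.symm

-- ===== VERDICT (by name: the statement is the Claim_ definition above) =====
theorem longest_uncommon_subsequence_spec : Claim_equal_longest_uncommon_subsequence := by
  intro l _
  unfold Spec_longest_uncommon_subsequence
  rw [pvB_eq_pvG]
  show pvLoopA (PySem.List.sorted l (fun s => PySem.Str.len s) true)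
        (PySem.List.sorted l (fun s => PySem.Str.len s) true) = pvG l l (-1)
  have hperm : (PySem.List.sorted l (fun s => PySem.Str.len s) true).Perm l :=
    PySem.List.sorted_perm ..
  have hP : pvP (PySem.List.sorted l (fun s => PySem.Str.len s) true) = pvP l := by
    funext x
    simp only [pvP, hperm.countP_eq]
  rw [pvLoopA_eq_pvG _ _ (PySem.List.sorted_pairwise_rev ..)]
  · rw [show pvG (PySem.List.sorted l (fun s => PySem.Str.len s) true) = pvG l by
      funext m acc; simp only [pvG, hP]]
    exact pvG_perm l hperm (-1)
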